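-- pv_equiv track=rewrite | github.com/hurryduck/solving-algorithmic-problems | BaekjoonOnlineJudge/python/rank/silver/v/p3711.py | find_min_m
-- ===== SOURCE A (Python) =====
-- def find_min_m(student_ids):
--     m = 1
--     while True:
--         remainders = set()
--         unique = True
--         for student_id in student_ids:
--             remainder = student_id % m
--             if remainder in remainders:
--                 unique = False
--                 break
--             remainders.add(remainder)
--         if unique:
--             return m
--         m += 1
-- ===== SOURCE B (Python) =====
-- def find_min_m(student_ids):
--     diffs = set()
--     for i, a in enumerate(student_ids):
--         for b in student_ids[i + 1:]:
--             diffs.add(abs(a - b))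
--     m = 1
--     while any(d % m == 0 for d in diffs):
--         m += 1
--     return m
-- ===== Notes on version B (the rewrite author's own statement) =====
-- stated objective: alternative
-- what changed: B precomputes the set of absolute pairwise differences once and then scans it for a divisor of m, instead of rebuilding a remainder set for every candidate m; two ids collide mod m exactly when m divides their difference.
import Mathlib
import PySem

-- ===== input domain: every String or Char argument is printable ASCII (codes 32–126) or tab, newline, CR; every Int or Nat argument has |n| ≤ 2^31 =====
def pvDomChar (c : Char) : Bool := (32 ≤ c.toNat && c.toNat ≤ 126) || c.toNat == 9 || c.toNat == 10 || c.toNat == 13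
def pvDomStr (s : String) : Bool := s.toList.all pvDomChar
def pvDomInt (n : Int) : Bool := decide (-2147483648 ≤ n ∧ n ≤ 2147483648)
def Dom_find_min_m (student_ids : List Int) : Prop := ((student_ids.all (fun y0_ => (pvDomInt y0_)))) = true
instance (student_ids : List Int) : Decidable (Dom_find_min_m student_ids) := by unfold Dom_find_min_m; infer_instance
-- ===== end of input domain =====

-- B precomputes the set of absolute pairwise differences once and scans it for a divisor
-- of each candidate m, instead of rebuilding a remainder set per m (alternative algorithm).
-- Both Python versions loop forever on duplicate ids (there both ports return the same
-- fuel-out default 0); the fuel below (max pairwise difference + 2) is sufficient on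
-- every duplicate-free input.

-- fuel shared by both ports (an artifact of making the 'while True' loops total)
def pvPairDiffs : List Int → List Int
  | [] => []
  | x :: xs => xs.map (fun y => |x - y|) ++ pvPairDiffs xs

def pvFuel (student_ids : List Int) : Nat :=
  ((pvPairDiffs student_ids).foldr max 0).toNat + 2

-- ===== PORT A =====
-- the inner 'for student_id in student_ids' loop with its remainder set
def pvAInner (m : Int) : List Int → PySem.Set Int → Bool
  | [], _ => true
  | x :: xs, remainders =>
    let r := PySem.Int.mod x m
    if PySem.Set.contains remainders r then false
    else pvAInner m xs (PySem.Set.add remainders r)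

-- the 'while True: … m += 1' loop
def pvALoop (student_ids : List Int) (m : Int) : Nat → Int
  | 0 => 0
  | fuel + 1 =>
    if pvAInner m student_ids PySem.Set.empty then m
    else pvALoop student_ids (m + 1) fuel

def find_min_m (student_ids : List Int) : Int :=
  pvALoop student_ids 1 (pvFuel student_ids)

-- ===== PORT B =====
-- the 'while any(d % m == 0 for d in diffs): m += 1' loop
def pvBLoop (diffs : List Int) (m : Int) : Nat → Int
  | 0 => 0
  | fuel + 1 =>
    if diffs.any (fun d => PySem.Int.mod d m == 0) then pvBLoop diffs (m + 1) fuel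
    else m

def find_min_m_alt (student_ids : List Int) : Int :=
  let diffs : PySem.Set Int := PySem.Set.ofList (pvPairDiffs student_ids)
  pvBLoop diffs 1 (pvFuel student_ids)

-- ===== PRECONDITION & SPEC =====
def Spec_find_min_m (student_ids : List Int) (out : Int) : Prop := out = find_min_m_alt student_ids
instance (student_ids : List Int) (out : Int) : Decidable (Spec_find_min_m student_ids out) := by unfold Spec_find_min_m; infer_instance

-- ===== CLAIM (what is proved, stated in full; the proofs are below) =====
def Claim_equal_find_min_m : Prop := ∀ (student_ids : List Int), Dom_find_min_m student_ids → Spec_find_min_m student_ids (find_min_m student_ids)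

-- ===== LEMMAS AND PROOFS =====

-- membership in an arbitrary seed set s: the inner loop of A succeeds iff the remainders
-- are pairwise distinct and avoid s
lemma pvAInner_eq_true_iff (m : Int) (ids : List Int) (s : PySem.Set Int) :
    pvAInner m ids s = true ↔
      ((ids.map (fun x => PySem.Int.mod x m)).Nodup ∧
        ∀ x ∈ ids, PySem.Int.mod x m ∉ s) := by
  induction ids generalizing s with
  | nil => simp [pvAInner]
  | cons x xs ih =>
    simp only [pvAInner]
    rcases hc : PySem.Set.contains s (PySem.Int.mod x m) with _ | _
    · rw [if_neg (by simp), ih]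
      have hc' : PySem.Int.mod x m ∉ s := fun h => by
        rw [(PySem.Set.contains_iff s (PySem.Int.mod x m)).mpr h] at hc
        cases hc
      constructor
      · rintro ⟨hnd, hall⟩
        refine ⟨List.nodup_cons.mpr ⟨?_, hnd⟩, ?_⟩
        · intro hmem
          rcases List.mem_map.mp hmem with ⟨y, hy, hyeq⟩
          have := hall y hy
          rw [PySem.Set.mem_add] at this
          exact this (Or.inr (by simpa using hyeq))
        · intro z hz
          rcases List.mem_cons.mp hz with h | h
          · subst h; exact hc'
          · intro hzs
            exact hall z h ((PySem.Set.mem_add s _ _).mpr (Or.inl hzs))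
      · rintro ⟨hnd, hall⟩
        rcases List.nodup_cons.mp hnd with ⟨hx, hnd'⟩
        refine ⟨hnd', ?_⟩
        intro z hz hzs
        rcases (PySem.Set.mem_add s _ _).mp hzs with h | h
        · exact hall z (List.mem_cons_of_mem _ hz) h
        · exact hx (List.mem_map.mpr ⟨z, hz, by simpa using h⟩)
    · rw [if_pos (by simp)]
      constructor
      · intro h; cases h
      · rintro ⟨-, hall⟩
        exact absurd ((PySem.Set.contains_iff s _).mp hc)
          (hall x List.mem_cons_self)

lemma mod_eq_mod_iff_dvd_sub (x y m : Int) (hm : 0 < m) :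
    PySem.Int.mod x m = PySem.Int.mod y m ↔ m ∣ (x - y) := by
  rw [PySem.Int.mod_eq_emod_of_pos hm, PySem.Int.mod_eq_emod_of_pos hm]
  constructor
  · intro h
    exact Int.dvd_of_emod_eq_zero (Int.emod_eq_emod_iff_emod_sub_eq_zero.mp h)
  · intro h
    exact Int.emod_eq_emod_iff_emod_sub_eq_zero.mpr (Int.emod_eq_zero_of_dvd h)

-- the two per-m tests agree (for positive m): A's remainders all-distinct check equals
-- B's "no pairwise difference divisible by m" check
lemma nodup_iff_no_div (m : Int) (hm : 0 < m) (ids : List Int) :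
    (ids.map (fun x => PySem.Int.mod x m)).Nodup ↔
      ∀ d ∈ pvPairDiffs ids, ¬ m ∣ d := by
  induction ids with
  | nil => simp [pvPairDiffs]
  | cons x xs ih =>
    simp only [List.map_cons, List.nodup_cons, pvPairDiffs, List.mem_append, ih]
    constructor
    · rintro ⟨hx, hrest⟩
      intro d hd
      rcases hd with hd | hd
      · rcases List.mem_map.mp hd with ⟨y, hy, rfl⟩
        intro hdvd
        rw [dvd_abs] at hdvd
        exact hx (List.mem_map.mpr ⟨y, hy, ((mod_eq_mod_iff_dvd_sub x y m hm).mpr hdvd).symm⟩)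
      · exact hrest d hd
    · intro h
      refine ⟨?_, fun d hd => h d (Or.inr hd)⟩
      intro hmem
      rcases List.mem_map.mp hmem with ⟨y, hy, hyeq⟩
      have hdvd := (mod_eq_mod_iff_dvd_sub x y m hm).mp hyeq.symm
      exact h |x - y| (Or.inl (List.mem_map.mpr ⟨y, hy, rfl⟩)) ((dvd_abs m _).mpr hdvd)

lemma checks_eq (ids : List Int) (m : Int) (hm : 0 < m) :
    pvAInner m ids PySem.Set.empty =
      !((PySem.Set.ofList (pvPairDiffs ids)).any (fun d => PySem.Int.mod d m == 0)) := by
  rcases hA : pvAInner m ids PySem.Set.empty with _ | _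
  · -- A's check false: some difference divisible
    have : ¬ ((ids.map (fun x => PySem.Int.mod x m)).Nodup ∧
        ∀ x ∈ ids, PySem.Int.mod x m ∉ (PySem.Set.empty : PySem.Set Int)) := by
      intro h; rw [← pvAInner_eq_true_iff] at h; rw [hA] at h; cases h
    have hnd : ¬ (ids.map (fun x => PySem.Int.mod x m)).Nodup := by
      intro h; exact this ⟨h, by simp [PySem.Set.empty]⟩
    rw [nodup_iff_no_div m hm] at hnd
    simp only [not_forall, not_not, exists_prop] at hnd
    rcases hnd with ⟨d, hd, hdvd⟩
    have : (PySem.Set.ofList (pvPairDiffs ids)).any (fun d => PySem.Int.mod d m == 0) = true := by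
      refine List.any_eq_true.mpr ⟨d, (PySem.Set.mem_ofList _ _).mpr hd, ?_⟩
      simp [PySem.Int.mod_eq_zero_iff_dvd, hdvd]
    simp [this]
  · -- A's check true: no difference divisible
    have h := (pvAInner_eq_true_iff m ids PySem.Set.empty).mp hA
    have hnd := (nodup_iff_no_div m hm ids).mp h.1
    have : (PySem.Set.ofList (pvPairDiffs ids)).any (fun d => PySem.Int.mod d m == 0) = false := by
      rw [← Bool.not_eq_true, List.any_eq_true]
      rintro ⟨d, hd, hdd⟩
      exact hnd d ((PySem.Set.mem_ofList _ _).mp hd)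
        (PySem.Int.mod_eq_zero_iff_dvd d m |>.mp (by simpa using hdd))
    simp [this]

lemma loops_eq (ids : List Int) : ∀ (fuel : Nat) (m : Int), 0 < m →
    pvALoop ids m fuel = pvBLoop (PySem.Set.ofList (pvPairDiffs ids)) m fuel := by
  intro fuel
  induction fuel with
  | zero => intro m _; rfl
  | succ n ih =>
    intro m hm
    simp only [pvALoop, pvBLoop, checks_eq ids m hm]
    rcases h : (PySem.Set.ofList (pvPairDiffs ids)).any (fun d => PySem.Int.mod d m == 0) with _ | _
    · simp
    · simpa using ih (m + 1) (by omega)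

-- ===== VERDICT (by name: the statement is the Claim_ definition above) =====
theorem find_min_m_spec : Claim_equal_find_min_m := by
  intro ids _
  unfold Spec_find_min_m find_min_m find_min_m_alt
  exact loops_eq ids (pvFuel ids) 1 (by omega)
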